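-- pv_equiv track=rewrite | github.com/Iriday/HyperNews-Portal | news/models.py | sort_articles_by_date
-- ===== SOURCE A (Python) =====
-- def sort_articles_by_date(articles, newer_first=True):
--     articles.sort(key=lambda v: v["created"])
--     if newer_first:
--         articles.reverse()
--     sorted_articles = {}
--
--     for article in articles:
--         sorted_articles.setdefault(article["created"][:10], []).append(article)
--
--     return sorted_articles.items()
-- ===== SOURCE B (Python) =====
-- def sort_articles_by_date(articles, newer_first=True):
--     articles.sort(key=lambda v: v["created"])
--     if newer_first:
--         articles.reverse()
--
--     def group(arts):
--         # recursive partition: first day key, its articles, then group the rest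
--         if not arts:
--             return []
--         day = arts[0]["created"][:10]
--         same = [a for a in arts if a["created"][:10] == day]
--         rest = [a for a in arts if a["created"][:10] != day]
--         return [(day, same)] + group(rest)
--
--     return group(articles)
-- ===== Notes on version B (the rewrite author's own statement) =====
-- stated objective: alternative
-- what changed: Replaces the dict-setdefault accumulation pass with a recursive partition: repeatedly take the first remaining day key, split the list into that day's articles and the rest, and recurse on the rest (no dict is built); the sort-then-reverse step is kept verbatim to preserve tie order and in-place mutation.
import Mathlib
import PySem

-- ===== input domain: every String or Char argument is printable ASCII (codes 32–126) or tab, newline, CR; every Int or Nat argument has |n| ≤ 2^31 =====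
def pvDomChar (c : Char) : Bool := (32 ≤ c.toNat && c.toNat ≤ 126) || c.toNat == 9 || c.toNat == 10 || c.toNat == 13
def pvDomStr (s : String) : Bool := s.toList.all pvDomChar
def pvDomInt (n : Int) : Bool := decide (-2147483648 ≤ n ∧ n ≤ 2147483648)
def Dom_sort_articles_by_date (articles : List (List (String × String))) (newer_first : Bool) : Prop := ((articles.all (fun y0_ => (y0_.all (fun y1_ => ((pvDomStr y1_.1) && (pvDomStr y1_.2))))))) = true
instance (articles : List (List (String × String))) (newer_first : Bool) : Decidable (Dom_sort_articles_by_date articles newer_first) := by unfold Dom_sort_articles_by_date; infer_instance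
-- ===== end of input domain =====

-- B replaces A's dict-setdefault accumulation with a recursive partition: take the first
-- remaining day key, split off its articles, recurse on the rest (no dict at all);
-- the sort-then-reverse step is kept verbatim.
-- Both A and B mutate `articles` in place (sort + optional reverse); the theorem is about the return value.

-- article["created"]: Python dict lookup (dict built from the pair list, later duplicates overwrite).
-- Missing key would be a KeyError in Python — excluded by Pre_; the "" default is never reached there.
def pvGetCreated (a : List (String × String)) : String :=
  (PySem.Dict.ofList a).getD "created" ""

-- article["created"][:10] — s[:10] on a string is the clamped 10-char prefix, exact as `take`.
def pvDay (a : List (String × String)) : String :=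
  String.mk ((pvGetCreated a).toList.take 10)

-- ===== PORT A =====
def sort_articles_by_date (articles : List (List (String × String))) (newer_first : Bool) : List (String × (List (List (String × String)))) :=
  let s := PySem.List.sorted articles (fun v => pvGetCreated v) false
  let s := if newer_first then s.reverse else s
  let d := s.foldl (fun d article => d.modify (pvDay article) [] (fun l => l ++ [article])) PySem.Dict.empty
  d.items

-- ===== PORT B =====
-- group(arts): recursive partition by the first article's day.
def pvGroup (arts : List (List (String × String))) : List (String × (List (List (String × String)))) :=
  match arts with
  | [] => []
  | a :: t =>
    (pvDay a, (a :: t).filter (fun x => pvDay x == pvDay a))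
      :: pvGroup ((a :: t).filter (fun x => !(pvDay x == pvDay a)))
termination_by arts.length
decreasing_by
  simp only [List.filter_cons, beq_self_eq_true, Bool.not_true, if_neg Bool.false_ne_true,
    List.length_cons]
  exact Nat.lt_succ_of_le (List.length_filter_le _ t)

def sort_articles_by_date_alt (articles : List (List (String × String))) (newer_first : Bool) : List (String × (List (List (String × String)))) :=
  let s := PySem.List.sorted articles (fun v => pvGetCreated v) false
  let s := if newer_first then s.reverse else s
  pvGroup s

-- ===== PRECONDITION & SPEC =====
-- Pre_ excludes exactly the inputs where an article lacks the "created" key, on which Python A raises KeyError.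
def Pre_sort_articles_by_date (articles : List (List (String × String))) (newer_first : Bool) : Prop :=
  (articles.all (fun a => (PySem.Dict.ofList a).contains "created")) = true
instance (articles : List (List (String × String))) (newer_first : Bool) : Decidable (Pre_sort_articles_by_date articles newer_first) := by unfold Pre_sort_articles_by_date; infer_instance

def pvWitness_sort_articles_by_date : (List (List (String × String))) × Bool :=
  ([[("created", "2020-01-02T10:00"), ("title", "a")], [("created", "2020-01-02T09:00")], [("created", "2019-12-31")]], true)

def Spec_sort_articles_by_date (articles : List (List (String × String))) (newer_first : Bool) (out : List (String × (List (List (String × String))))) : Prop := out = sort_articles_by_date_alt articles newer_first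
instance (articles : List (List (String × String))) (newer_first : Bool) (out : List (String × (List (List (String × String))))) : Decidable (Spec_sort_articles_by_date articles newer_first out) := by unfold Spec_sort_articles_by_date; infer_instance

-- ===== CLAIM (what is proved, stated in full; the proofs are below) =====
def Claim_equal_sort_articles_by_date : Prop := ∀ (articles : List (List (String × String))) (newer_first : Bool), Dom_sort_articles_by_date articles newer_first → Pre_sort_articles_by_date articles newer_first → Spec_sort_articles_by_date articles newer_first (sort_articles_by_date articles newer_first)

-- ===== LEMMAS AND PROOFS =====

-- Folding `add` ignores elements already present in the accumulator.
theorem pvFoldl_add_skip {α : Type} [BEq α] [LawfulBEq α] (l : List α) (acc : List α) (x : α)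
    (hx : x ∈ acc) :
    l.foldl PySem.Set.add acc = (l.filter (fun y => !(y == x))).foldl PySem.Set.add acc := by
  induction l generalizing acc with
  | nil => rfl
  | cons z t ih =>
    by_cases hz : z = x
    · subst hz
      have hc : PySem.Set.add acc z = acc := by
        simp [PySem.Set.add, PySem.Set.contains, hx]
      simp only [List.filter_cons, beq_self_eq_true, Bool.not_true, if_neg Bool.false_ne_true,
        List.foldl_cons, hc]
      exact ih acc hx
    · have hzx : (!(z == x)) = true := by simp [hz]
      simp only [List.filter_cons, hzx, List.foldl_cons]
      apply ih
      simp only [PySem.Set.add]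
      split
      · exact hx
      · exact List.mem_append_left _ hx

-- A fresh head element stays at the front of the fold when it never recurs in the list.
theorem pvFoldl_add_cons_front {α : Type} [BEq α] [LawfulBEq α] (l : List α) (acc : List α) (x : α)
    (hx : x ∉ l) :
    l.foldl PySem.Set.add (x :: acc) = x :: l.foldl PySem.Set.add acc := by
  induction l generalizing acc with
  | nil => rfl
  | cons z t ih =>
    have hzx : (z == x) = false := by
      simp only [beq_eq_false_iff_ne, ne_eq]
      intro h; exact hx (h ▸ List.mem_cons_self)
    have ht : x ∉ t := fun h => hx (List.mem_cons_of_mem _ h)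
    have hadd : PySem.Set.add (x :: acc) z = x :: PySem.Set.add acc z := by
      simp only [PySem.Set.add, PySem.Set.contains, List.contains_cons, hzx, Bool.false_or]
      split
      · rfl
      · rfl
    rw [List.foldl_cons, List.foldl_cons, hadd]
    exact ih _ ht

-- Python's ordered dedup pulls the head out and drops its later duplicates.
theorem pvDedup_cons {α : Type} [BEq α] [LawfulBEq α] (x : α) (l : List α) :
    PySem.List.dedup (x :: l) = x :: PySem.List.dedup (l.filter (fun y => !(y == x))) := by
  have hempty : PySem.Set.add (PySem.Set.empty : PySem.Set α) x = [x] := by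
    simp [PySem.Set.add, PySem.Set.empty]
  have hnotin : x ∉ l.filter (fun y => !(y == x)) := by
    intro h
    have := List.of_mem_filter h
    simp at this
  calc PySem.List.dedup (x :: l)
      = l.foldl PySem.Set.add [x] := by
        simp [PySem.List.dedup, PySem.Set.ofList]
    _ = (l.filter (fun y => !(y == x))).foldl PySem.Set.add [x] :=
        pvFoldl_add_skip l [x] x List.mem_cons_self
    _ = x :: (l.filter (fun y => !(y == x))).foldl PySem.Set.add [] :=
        pvFoldl_add_cons_front _ [] x hnotin
    _ = x :: PySem.List.dedup (l.filter (fun y => !(y == x))) := by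
        simp [PySem.List.dedup, PySem.Set.ofList, PySem.Set.empty]

-- The grouping loop of A, over ANY list, yields as items exactly the (dedup keys, per-key filter) map.
theorem pvGroup_items (s : List (List (String × String))) :
    (s.foldl (fun d article => d.modify (pvDay article) [] (fun l => l ++ [article])) PySem.Dict.empty).items
      = (PySem.List.dedup (s.map (fun a => pvDay a))).map
          (fun day => (day, s.filter (fun a => pvDay a == day))) := by
  set D := s.foldl (fun d article => d.modify (pvDay article) [] (fun l => l ++ [article])) PySem.Dict.empty with hD
  have hnd : D.keys.Nodup := by
    exact PySem.Dict.nodup_keys_foldl_modify_key s (fun a => pvDay a) []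
      (fun _ article => fun l => l ++ [article]) PySem.Dict.empty (by simp)
  have hkeys : D.keys = PySem.List.dedup (s.map (fun a => pvDay a)) := by
    rw [hD, PySem.Dict.keys_foldl_modify_key]
    simp [PySem.Set.update, PySem.Set.ofList]
  have hget : ∀ c, D.getD c [] = s.filter (fun a => pvDay a == c) := by
    intro c
    have hmap : D = (s.map (fun a => (pvDay a, a))).foldl
        (fun d p => d.modify p.1 [] (fun l => l ++ [p.2])) PySem.Dict.empty := by
      rw [hD, List.foldl_map]
    rw [hmap, PySem.Dict.getD_foldl_modify_append]
    simp [List.filter_map, Function.comp_def]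
  rw [PySem.Dict.items_eq_map_keys D hnd [], hkeys]
  exact List.map_congr_left (fun c _ => by rw [hget c])

-- B's recursive partition computes, over ANY list, the same (dedup keys, per-key filter) map.
theorem pvGroup_eq (s : List (List (String × String))) :
    pvGroup s = (PySem.List.dedup (s.map (fun a => pvDay a))).map
        (fun day => (day, s.filter (fun a => pvDay a == day))) := by
  induction s using pvGroup.induct with
  | case1 => simp [pvGroup]
  | case2 a t ih =>
    have hrest : (a :: t).filter (fun x => !(pvDay x == pvDay a))
        = t.filter (fun x => !(pvDay x == pvDay a)) := by
      simp
    rw [hrest] at ih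
    have hfm : (t.map (fun a => pvDay a)).filter (fun y => !(y == pvDay a))
        = (t.filter (fun x => !(pvDay x == pvDay a))).map (fun a => pvDay a) := by
      simp [List.filter_map, Function.comp_def]
    rw [pvGroup, hrest, ih, List.map_cons, pvDedup_cons, hfm, List.map_cons]
    congr 1
    apply List.map_congr_left
    intro day hday
    have hdayne : day ≠ pvDay a := by
      have hday' : day ∈ PySem.Set.ofList
          ((t.filter (fun x => !(pvDay x == pvDay a))).map (fun a => pvDay a)) := by
        rw [← PySem.List.dedup_eq_ofList]; exact hday
      have hmem := (PySem.Set.mem_ofList _ day).mp hday'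
      obtain ⟨x, hx, hxe⟩ := List.mem_map.mp hmem
      have := List.of_mem_filter hx
      simp only [Bool.not_eq_eq_eq_not, Bool.not_true, beq_eq_false_iff_ne, ne_eq] at this
      exact hxe ▸ this
    have hane : (pvDay a == day) = false := by
      simp only [beq_eq_false_iff_ne, ne_eq]
      exact Ne.symm hdayne
    congr 1
    rw [List.filter_cons, hane]
    simp only [if_neg Bool.false_ne_true, List.filter_filter]
    apply List.filter_congr
    intro x _
    by_cases hx : pvDay x = day
    · simp [hx, hdayne]
    · simp [hx]

-- ===== VERDICT (by name: the statement is the Claim_ definition above) =====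
theorem sort_articles_by_date_spec : Claim_equal_sort_articles_by_date := by
  intro articles newer_first _ _
  unfold Spec_sort_articles_by_date sort_articles_by_date sort_articles_by_date_alt
  rw [pvGroup_items, pvGroup_eq]
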